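-- pv_equiv track=rewrite | github.com/nickyu42/Huffman | main.py | byte_string_generator
-- ===== SOURCE A (Python) =====
-- def byte_string_generator(byte_string):
--     pos = 0
--     length = len(byte_string) - 1
--
--     while pos <= length:
--         if length - pos < 8:
--             yield byte_string[pos:] + '0' * (7 - (length % 8))
--         else:
--             yield byte_string[pos:pos+8]
--
--         pos += 8
-- ===== SOURCE B (Python) =====
-- def byte_string_generator(byte_string):
--     # Stream characters one at a time into an 8-char buffer; emit the buffer
--     # when it fills, and pad only the leftover buffer at the end.
--     buf = []
--     for ch in byte_string:
--         buf.append(ch)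
--         if len(buf) == 8:
--             yield ''.join(buf)
--             buf = []
--     if buf:
--         yield ''.join(buf) + '0' * (8 - len(buf))
-- ===== Notes on version B (the rewrite author's own statement) =====
-- stated objective: alternative
-- what changed: A walks the string by index, slicing out 8-char pieces with a per-chunk branch that pads the final slice; B never slices or indexes: it streams characters one at a time into an 8-char buffer, emitting the buffer whenever it fills and padding only the leftover buffer after the pass.
import Mathlib
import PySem

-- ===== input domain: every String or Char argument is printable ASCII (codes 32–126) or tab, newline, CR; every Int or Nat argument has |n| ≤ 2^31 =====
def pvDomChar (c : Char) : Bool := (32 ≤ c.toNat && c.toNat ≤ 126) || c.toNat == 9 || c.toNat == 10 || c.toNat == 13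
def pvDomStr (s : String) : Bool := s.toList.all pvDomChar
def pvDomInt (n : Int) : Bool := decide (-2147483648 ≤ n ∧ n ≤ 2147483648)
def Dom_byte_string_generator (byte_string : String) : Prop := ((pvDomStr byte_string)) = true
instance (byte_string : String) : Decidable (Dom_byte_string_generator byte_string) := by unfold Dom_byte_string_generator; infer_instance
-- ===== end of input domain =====

-- B streams characters into an 8-char buffer (no indexing or slicing), emitting the
-- buffer when full and padding only the leftover at the end; same values as A's
-- index-and-slice loop.

-- ===== PORT A =====
-- while pos <= length: yield …; pos += 8   (length = len(s) - 1, fixed)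
def byteGoA (s : List Char) (length pos : Int) : List String :=
  if h : pos ≤ length then
    (if length - pos < 8 then
       String.ofList (PySem.List.slice s (some pos) none ++
         List.replicate (7 - PySem.Int.mod length 8).toNat '0')
     else
       String.ofList (PySem.List.slice s (some pos) (some (pos + 8)))) ::
    byteGoA s length (pos + 8)
  else []
termination_by (length + 1 - pos).toNat
decreasing_by omega

def byte_string_generator (byte_string : String) : List String :=
  byteGoA byte_string.toList (PySem.Str.len byte_string - 1) 0

-- ===== PORT B =====
-- for ch in s: buf.append(ch); if len(buf)==8: yield ''.join(buf); buf=[]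
-- then: if buf: yield ''.join(buf) + '0'*(8-len(buf))
def byteGoB : List Char → List Char → List String
  | [], buf =>
      if buf.isEmpty then []
      else [String.ofList (buf ++ List.replicate (8 - buf.length) '0')]
  | c :: cs, buf =>
      let buf' := buf ++ [c]
      if buf'.length == 8 then String.ofList buf' :: byteGoB cs []
      else byteGoB cs buf'

def byte_string_generator_alt (byte_string : String) : List String :=
  byteGoB byte_string.toList []

-- ===== PRECONDITION & SPEC =====
def Spec_byte_string_generator (byte_string : String) (out : List String) : Prop := out = byte_string_generator_alt byte_string
instance (byte_string : String) (out : List String) : Decidable (Spec_byte_string_generator byte_string out) := by unfold Spec_byte_string_generator; infer_instance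

-- ===== CLAIM (what is proved, stated in full; the proofs are below) =====
def Claim_equal_byte_string_generator : Prop := ∀ (byte_string : String), Dom_byte_string_generator byte_string → Spec_byte_string_generator byte_string (byte_string_generator byte_string)

-- ===== LEMMAS AND PROOFS =====

-- xs[i:i+8] equals (xs.drop 8)[i-8:i], for i ≥ 8
lemma slice_drop8 (xs : List Char) (i : Int) (h : 8 ≤ i) :
    PySem.List.slice (xs.drop 8) (some (i - 8)) (some i) =
    PySem.List.slice xs (some i) (some (i + 8)) := by
  rw [PySem.List.slice_toNat _ (by omega) (by omega),
      PySem.List.slice_toNat _ (by omega) (by omega), List.drop_drop]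
  have h1 : 8 + (i - 8).toNat = i.toNat := by omega
  have h2 : i.toNat - (i - 8).toNat = (i + 8).toNat - i.toNat := by omega
  rw [h1, h2]

-- xs[i:] equals (xs.drop 8)[i-8:], for i ≥ 8
lemma slice_drop8_tail (xs : List Char) (i : Int) (h : 8 ≤ i) :
    PySem.List.slice (xs.drop 8) (some (i - 8)) none =
    PySem.List.slice xs (some i) none := by
  rw [PySem.List.slice_some_none, PySem.List.slice_some_none, List.drop_drop]
  by_cases hle : xs.length ≤ 8
  · rw [List.drop_eq_nil_of_le (by omega), List.drop_eq_nil_of_le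
      (by simp [PySem.List.clampIdx]; split_ifs <;> omega)]
  · congr 1
    simp only [PySem.List.clampIdx, List.length_drop]
    split_ifs <;> omega

-- A's loop from pos ≥ 8 is A's loop on the 8-dropped string from pos - 8
lemma shiftA (cs : List Char) (L pos : Int) (h8 : 8 ≤ pos) :
    byteGoA cs L pos = byteGoA (cs.drop 8) (L - 8) (pos - 8) := by
  have hm : PySem.Int.mod (L - 8) 8 = PySem.Int.mod L 8 := by
    rw [PySem.Int.mod_eq_emod_of_pos (by norm_num), PySem.Int.mod_eq_emod_of_pos (by norm_num)]
    omega
  by_cases h : pos ≤ L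
  · have hrec := shiftA cs L (pos + 8) (by omega)
    rw [show pos + 8 - 8 = pos from by ring] at hrec
    rw [byteGoA, dif_pos h, hrec]
    conv_rhs => rw [byteGoA]
    rw [dif_pos (show pos - 8 ≤ L - 8 by omega),
        show pos - 8 + 8 = pos from by ring]
    have hd : L - 8 - (pos - 8) = L - pos := by ring
    rw [hd, hm, slice_drop8_tail cs pos h8, slice_drop8 cs pos h8]
  · rw [byteGoA, dif_neg h]
    rw [byteGoA, dif_neg (show ¬ pos - 8 ≤ L - 8 by omega)]
termination_by (L + 1 - pos).toNat
decreasing_by omega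

-- B's buffer loop, characterised: with a partially filled buffer it either
-- completes one 8-char chunk and restarts empty, or finishes with the padded leftover.
lemma byteGoB_take (cs buf : List Char) (h : buf.length < 8) :
    byteGoB cs buf =
      if 8 ≤ buf.length + cs.length then
        String.ofList (buf ++ cs.take (8 - buf.length)) ::
          byteGoB (cs.drop (8 - buf.length)) []
      else if (buf ++ cs).isEmpty then []
      else [String.ofList (buf ++ cs ++ List.replicate (8 - (buf.length + cs.length)) '0')] := by
  induction cs generalizing buf with
  | nil =>
      rw [byteGoB]
      simp only [List.append_nil, List.length_nil, Nat.add_zero]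
      rw [if_neg (show ¬ 8 ≤ buf.length from by omega)]
  | cons c cs ih =>
      rw [byteGoB]
      by_cases hfull : (buf ++ [c]).length = 8
      · have hb7 : buf.length = 7 := by simp at hfull; omega
        rw [if_pos (show ((buf ++ [c]).length == 8) = true from by simp [hfull]),
            if_pos (show 8 ≤ buf.length + (c :: cs).length from by simp; omega)]
        have htake : (c :: cs).take (8 - buf.length) = [c] := by simp [hb7]
        have hdrop : (c :: cs).drop (8 - buf.length) = cs := by simp [hb7]
        rw [htake, hdrop]
      · have hlt : (buf ++ [c]).length < 8 := by simp at hfull ⊢; omega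
        rw [if_neg (show ¬ ((buf ++ [c]).length == 8) = true from by simpa using hfull),
            ih _ hlt]
        by_cases hge : 8 ≤ buf.length + (cs.length + 1)
        · rw [if_pos (show 8 ≤ (buf ++ [c]).length + cs.length from by simp; omega),
              if_pos (show 8 ≤ buf.length + (c :: cs).length from by simp; omega)]
          have e : 8 - buf.length = (8 - (buf.length + 1)) + 1 := by omega
          have htake : (c :: cs).take (8 - buf.length) = c :: cs.take (8 - (buf.length + 1)) := by
            rw [e]; rfl
          have hdrop : (c :: cs).drop (8 - buf.length) = cs.drop (8 - (buf.length + 1)) := by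
            rw [e]; rfl
          rw [htake, hdrop]
          simp
        · rw [if_neg (show ¬ 8 ≤ (buf ++ [c]).length + cs.length from by simp; omega),
              if_neg (show ¬ 8 ≤ buf.length + (c :: cs).length from by simp; omega)]
          rw [if_neg (show ¬ ((buf ++ [c]) ++ cs).isEmpty = true from by simp),
              if_neg (show ¬ (buf ++ c :: cs).isEmpty = true from by simp)]
          simp only [List.length_append, List.length_cons, List.length_nil, Nat.zero_add,
            List.append_assoc, List.cons_append, List.nil_append]
          have e : 8 - (buf.length + 1 + cs.length) = 8 - (buf.length + (cs.length + 1)) := by omega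
          rw [e]

lemma main_eq (cs : List Char) :
    byteGoA cs ((cs.length : Int) - 1) 0 = byteGoB cs [] := by
  rw [byteGoB_take cs [] (by simp)]
  simp only [List.nil_append, List.length_nil, Nat.zero_add, Nat.sub_zero]
  rcases Nat.eq_zero_or_pos cs.length with h0 | hpos
  · have : cs = [] := List.eq_nil_of_length_eq_zero h0
    subst this
    rw [byteGoA, dif_neg (by norm_num)]
    simp
  by_cases h8 : cs.length < 8
  · -- exactly one short, padded chunk on both sides
    rw [if_neg (by omega),
        if_neg (by simp [List.isEmpty_iff]; exact List.ne_nil_of_length_pos hpos)]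
    rw [byteGoA, dif_pos (by omega)]
    rw [if_pos (by omega)]
    rw [byteGoA, dif_neg (by omega)]
    have hs : PySem.List.slice cs (some 0) none = cs := by
      rw [PySem.List.slice_some_none]; simp [PySem.List.clampIdx]
    have hm : (7 - PySem.Int.mod ((cs.length : Int) - 1) 8).toNat = 8 - cs.length := by
      rw [PySem.Int.mod_eq_emod_of_pos (by norm_num)]; omega
    rw [hs, hm]
  · -- first 8-char chunk + recursion on cs.drop 8
    rw [Nat.not_lt] at h8
    rw [if_pos (by omega)]
    rw [byteGoA, dif_pos (by omega)]
    by_cases hx : cs.length = 8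
    · -- boundary: the last chunk is exactly full
      rw [if_pos (by omega)]
      rw [byteGoA, dif_neg (by omega)]
      have hd : cs.drop 8 = [] := List.drop_eq_nil_of_le (by omega)
      rw [hd, byteGoB]
      have hm7 : PySem.Int.mod ((cs.length : Int) - 1) 8 = 7 := by
        rw [PySem.Int.mod_eq_emod_of_pos (by norm_num)]; omega
      rw [hm7]
      have ht : cs.take (8 - 0) = cs := List.take_of_length_le (by omega)
      rw [ht]
      rw [PySem.List.slice_some_none]
      simp [PySem.List.clampIdx]
    · rw [if_neg (by omega)]
      have hrecA := shiftA cs ((cs.length : Int) - 1) 8 (by norm_num)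
      rw [show ((0 : Int) + 8) = 8 from by ring, hrecA]
      have e1 : (cs.length : Int) - 1 - 8 = ((cs.drop 8).length : Int) - 1 := by
        simp only [List.length_drop]; omega
      rw [e1, show (8 : Int) - 8 = 0 from by ring, main_eq (cs.drop 8)]
      congr 1
      rw [PySem.List.slice_toNat _ (by norm_num) (by norm_num)]
      simp
termination_by cs.length
decreasing_by simp only [List.length_drop]; omega

-- ===== VERDICT (by name: the statement is the Claim_ definition above) =====
theorem byte_string_generator_spec : Claim_equal_byte_string_generator := by
  intro s _
  unfold Spec_byte_string_generator byte_string_generator byte_string_generator_alt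
  have hl : PySem.Str.len s = (s.toList.length : Int) := by simp
  rw [hl]
  exact main_eq s.toList
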